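-- pv_equiv track=rewrite | github.com/kyz/adventofcode | 2020/day16.py | invalid_count
-- ===== SOURCE A (Python) =====
-- def invalid_count(rules, ticket):
--     total = 0
--     for v in ticket:
--         valid = False
--         for lo1, hi1, lo2, hi2 in rules.values():
--             valid |= lo1 <= v <= hi1 or lo2 <= v <= hi2
--         if not valid:
--             total += v
--     return total
-- ===== SOURCE B (Python) =====
-- def invalid_count(rules, ticket):
--     # Flatten every rule into its two intervals, sort them by lower bound,
--     # merge overlapping ones once, then test each ticket value against the
--     # merged, disjoint, sorted intervals with an early-exit scan.
--     ivs = []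
--     for lo1, hi1, lo2, hi2 in rules.values():
--         ivs.append((lo1, hi1))
--         ivs.append((lo2, hi2))
--     ivs.sort(key=lambda p: p[0])
--     merged = []
--     for lo, hi in ivs:
--         if merged and lo <= merged[-1][1]:
--             if hi > merged[-1][1]:
--                 merged[-1] = (merged[-1][0], hi)
--         else:
--             merged.append((lo, hi))
--
--     def covered(v):
--         for lo, hi in merged:
--             if v < lo:
--                 return False
--             if v <= hi:
--                 return True
--         return False
--
--     return sum(v for v in ticket if not covered(v))
-- ===== Notes on version B (the rewrite author's own statement) =====
-- stated objective: faster
-- what changed: Instead of testing every ticket value against every rule's two intervals, B flattens the intervals once, sorts and merges them into disjoint sorted intervals, and checks each value with an early-exit scan over the (typically much shorter) merged list.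
-- outside the precondition, e.g. on invalid_count({'r': (1, 2)}, []): A returns 0, B raises ValueError
import Mathlib
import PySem

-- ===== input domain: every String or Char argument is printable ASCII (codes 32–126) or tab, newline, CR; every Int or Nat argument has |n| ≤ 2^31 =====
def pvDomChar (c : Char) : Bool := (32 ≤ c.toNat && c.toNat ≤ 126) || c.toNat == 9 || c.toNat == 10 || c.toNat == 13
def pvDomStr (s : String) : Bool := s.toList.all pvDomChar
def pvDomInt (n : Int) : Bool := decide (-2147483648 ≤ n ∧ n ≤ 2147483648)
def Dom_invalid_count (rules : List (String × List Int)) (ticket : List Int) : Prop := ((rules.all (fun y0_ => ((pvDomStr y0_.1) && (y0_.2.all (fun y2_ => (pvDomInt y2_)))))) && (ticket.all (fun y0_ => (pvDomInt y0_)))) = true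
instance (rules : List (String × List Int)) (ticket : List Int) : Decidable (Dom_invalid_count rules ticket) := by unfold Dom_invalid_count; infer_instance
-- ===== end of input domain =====

-- B merges the rules' intervals once (sort + merge) and tests each ticket value
-- against the disjoint sorted merged intervals with an early-exit scan, which
-- a timing run measured as faster than A's scan of every rule per value.


-- ===== PORT A =====
-- inner loop: valid |= lo1 <= v <= hi1 or lo2 <= v <= hi2 over rules.values()
-- (a rule whose value list has not exactly 4 elements makes Python raise; Pre_ excludes it)
def pvValidA (rules : List (String × List Int)) (v : Int) : Bool :=
  rules.foldl (fun valid r =>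
    match r.2 with
    | [lo1, hi1, lo2, hi2] =>
        valid || ((decide (lo1 ≤ v) && decide (v ≤ hi1)) || (decide (lo2 ≤ v) && decide (v ≤ hi2)))
    | _ => valid) false

def invalid_count (rules : List (String × List Int)) (ticket : List Int) : Int :=
  ticket.foldl (fun total v => if !pvValidA rules v then total + v else total) 0

-- ===== PORT B =====
-- the flattened list of the rules' intervals, in order
def pvIvs (rules : List (String × List Int)) : List (Int × Int) :=
  rules.foldr (fun r acc =>
    match r.2 with
    | [lo1, hi1, lo2, hi2] => (lo1, hi1) :: (lo2, hi2) :: acc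
    | _ => acc) []

-- the merge loop's body; the Python list (append at the end, merged[-1] update)
-- is kept REVERSED here (head = last element), reversed once after the fold
def pvMergeStep (mr : List (Int × Int)) (iv : Int × Int) : List (Int × Int) :=
  match mr with
  | (l, h) :: t =>
      if iv.1 ≤ h then (if iv.2 > h then (l, iv.2) :: t else (l, h) :: t)
      else iv :: (l, h) :: t
  | [] => [iv]

def pvMerged (rules : List (String × List Int)) : List (Int × Int) :=
  ((PySem.List.sorted (pvIvs rules) (fun p => p.1) false).foldl pvMergeStep []).reverse

-- covered(v): early-exit scan over the merged intervals
def pvCovered (merged : List (Int × Int)) (v : Int) : Bool :=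
  match merged with
  | [] => false
  | (lo, hi) :: t => if v < lo then false else if v ≤ hi then true else pvCovered t v

def invalid_count_alt (rules : List (String × List Int)) (ticket : List Int) : Int :=
  let merged := pvMerged rules
  ticket.foldl (fun total v => if !pvCovered merged v then total + v else total) 0

-- ===== PRECONDITION & SPEC =====
-- Pre_ excludes rules whose value is not a 4-element sequence: A raises
-- ValueError unpacking them whenever the ticket is nonempty (with an empty
-- ticket A happens to return 0 without touching the rules), and B, which
-- unpacks all rules up front, raises on them for every ticket.
def Pre_invalid_count (rules : List (String × List Int)) (ticket : List Int) : Prop :=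
  ∀ r ∈ rules, r.2.length = 4

instance (rules : List (String × List Int)) (ticket : List Int) : Decidable (Pre_invalid_count rules ticket) := by
  unfold Pre_invalid_count; infer_instance

def pvWitness_invalid_count : (List (String × List Int)) × List Int :=
  ([("row", [1, 3, 5, 6]), ("seat", [10, 12, 0, 0])], [2, 4, 7, 11])

def Spec_invalid_count (rules : List (String × List Int)) (ticket : List Int) (out : Int) : Prop := out = invalid_count_alt rules ticket
instance (rules : List (String × List Int)) (ticket : List Int) (out : Int) : Decidable (Spec_invalid_count rules ticket out) := by unfold Spec_invalid_count; infer_instance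

-- ===== CLAIM (what is proved, stated in full; the proofs are below) =====
def Claim_equal_invalid_count : Prop := ∀ (rules : List (String × List Int)) (ticket : List Int), Dom_invalid_count rules ticket → Pre_invalid_count rules ticket → Spec_invalid_count rules ticket (invalid_count rules ticket)

-- ===== LEMMAS AND PROOFS =====

-- membership of v in some interval of a list
def pvAnyIv (ivs : List (Int × Int)) (v : Int) : Bool :=
  ivs.any (fun p => decide (p.1 ≤ v) && decide (v ≤ p.2))

theorem pvAnyIv_cons (p : Int × Int) (t : List (Int × Int)) (v : Int) :
    pvAnyIv (p :: t) v = ((decide (p.1 ≤ v) && decide (v ≤ p.2)) || pvAnyIv t v) := by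
  simp [pvAnyIv]

-- A's fold equals "v lies in some flattened interval"
theorem pvValidA_eq_anyIv (rules : List (String × List Int)) (v : Int) :
    pvValidA rules v = pvAnyIv (pvIvs rules) v := by
  have h : ∀ (rs : List (String × List Int)) (b : Bool),
      rs.foldl (fun valid r =>
        match r.2 with
        | [lo1, hi1, lo2, hi2] =>
            valid || ((decide (lo1 ≤ v) && decide (v ≤ hi1)) || (decide (lo2 ≤ v) && decide (v ≤ hi2)))
        | _ => valid) b = (b || pvAnyIv (pvIvs rs) v) := by
    intro rs
    induction rs with
    | nil => intro b; simp [pvIvs, pvAnyIv]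
    | cons r t ih =>
        intro b
        match hr : r.2 with
        | [lo1, hi1, lo2, hi2] =>
            simp only [List.foldl_cons, hr, ih, pvIvs, List.foldr_cons]
            rw [pvAnyIv_cons, pvAnyIv_cons]
            simp [Bool.or_assoc]
        | [] => simp only [List.foldl_cons, hr, ih, pvIvs, List.foldr_cons]
        | [a] => simp only [List.foldl_cons, hr, ih, pvIvs, List.foldr_cons]
        | [a, c] => simp only [List.foldl_cons, hr, ih, pvIvs, List.foldr_cons]
        | [a, c, d] => simp only [List.foldl_cons, hr, ih, pvIvs, List.foldr_cons]
        | a :: c :: d :: e :: f :: g => simp only [List.foldl_cons, hr, ih, pvIvs, List.foldr_cons]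
  simpa using h rules false

-- one merge fold preserves interval membership, given that every upcoming
-- interval starts no earlier than the accumulator's head
theorem pvFoldMerge_any (ivs : List (Int × Int)) (v : Int) :
    ∀ (mr : List (Int × Int)),
      ivs.Pairwise (fun a b => a.1 ≤ b.1) →
      (∀ x ∈ ivs, ∀ l h t, mr = (l, h) :: t → l ≤ x.1) →
      pvAnyIv (ivs.foldl pvMergeStep mr) v = (pvAnyIv mr v || pvAnyIv ivs v) := by
  induction ivs with
  | nil => intro mr _ _; simp [pvAnyIv]
  | cons iv t ih =>
      intro mr hp hinv
      have hp' : t.Pairwise (fun a b => a.1 ≤ b.1) := hp.tail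
      have hle : ∀ x ∈ t, iv.1 ≤ x.1 := by
        intro x hx; exact (List.pairwise_cons.mp hp).1 x hx
      rw [List.foldl_cons]
      match hmr : mr with
      | [] =>
          rw [show pvMergeStep [] iv = [iv] from rfl]
          rw [ih [iv] hp' (by intro x hx l h tt he; cases he; exact hle x hx)]
          rw [pvAnyIv_cons]; simp [pvAnyIv]
      | (l, h) :: tm =>
          have hlx : l ≤ iv.1 := hinv iv (List.mem_cons_self) l h tm rfl
          by_cases h1 : iv.1 ≤ h
          · by_cases h2 : iv.2 > h
            · have hstep : pvMergeStep ((l, h) :: tm) iv = (l, iv.2) :: tm := by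
                simp [pvMergeStep, h1, h2]
              rw [hstep, ih ((l, iv.2) :: tm) hp'
                    (by intro x hx l' h' t' he; cases he; exact hlx.trans (hle x hx))]
              simp only [pvAnyIv_cons]
              cases hvt : pvAnyIv tm v <;> cases hvt2 : pvAnyIv t v <;>
                simp only [Bool.or_true, Bool.true_or, Bool.or_false, Bool.false_or] <;>
                first
                | rfl
                | (rw [Bool.eq_iff_iff]
                   simp only [Bool.or_eq_true, Bool.and_eq_true, decide_eq_true_eq]
                   omega)
            · have hstep : pvMergeStep ((l, h) :: tm) iv = (l, h) :: tm := by
                simp [pvMergeStep, h1, h2]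
              rw [hstep, ih ((l, h) :: tm) hp'
                    (by intro x hx l' h' t' he; cases he; exact hlx.trans (hle x hx))]
              simp only [pvAnyIv_cons]
              cases hvt : pvAnyIv tm v <;> cases hvt2 : pvAnyIv t v <;>
                simp only [Bool.or_true, Bool.true_or, Bool.or_false, Bool.false_or] <;>
                first
                | rfl
                | (rw [Bool.eq_iff_iff]
                   simp only [Bool.or_eq_true, Bool.and_eq_true, decide_eq_true_eq]
                   omega)
          · have hstep : pvMergeStep ((l, h) :: tm) iv = iv :: (l, h) :: tm := by
              simp [pvMergeStep, h1]
            rw [hstep, ih (iv :: (l, h) :: tm) hp'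
                  (by intro x hx l' h' t' he; cases he; exact hle x hx)]
            simp only [pvAnyIv_cons]
            cases hvt : pvAnyIv tm v <;> cases hvt2 : pvAnyIv t v <;>
              simp only [Bool.or_true, Bool.true_or, Bool.or_false, Bool.false_or] <;>
              first
              | rfl
              | (rw [Bool.eq_iff_iff]
                 simp only [Bool.or_eq_true, Bool.and_eq_true, decide_eq_true_eq]
                 omega)

-- the merge fold keeps the reversed accumulator's first components nonincreasing
theorem pvFoldMerge_pairwise (ivs : List (Int × Int)) :
    ∀ (mr : List (Int × Int)),
      ivs.Pairwise (fun a b => a.1 ≤ b.1) →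
      (∀ x ∈ ivs, ∀ l h t, mr = (l, h) :: t → l ≤ x.1) →
      mr.Pairwise (fun a b => b.1 ≤ a.1) →
      (ivs.foldl pvMergeStep mr).Pairwise (fun a b => b.1 ≤ a.1) := by
  induction ivs with
  | nil => intro mr _ _ hmr; simpa using hmr
  | cons iv t ih =>
      intro mr hp hinv hmr
      have hp' : t.Pairwise (fun a b => a.1 ≤ b.1) := hp.tail
      have hle : ∀ x ∈ t, iv.1 ≤ x.1 := by
        intro x hx; exact (List.pairwise_cons.mp hp).1 x hx
      rw [List.foldl_cons]
      match hm : mr with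
      | [] =>
          exact ih [iv] hp' (by intro x hx l h tt he; cases he; exact hle x hx)
            (by simp)
      | (l, h) :: tm =>
          have hlx : l ≤ iv.1 := hinv iv (List.mem_cons_self) l h tm rfl
          have htm : ∀ y ∈ tm, y.1 ≤ l := by
            intro y hy; exact (List.pairwise_cons.mp hmr).1 y hy
          by_cases h1 : iv.1 ≤ h
          · by_cases h2 : iv.2 > h
            · have hstep : pvMergeStep ((l, h) :: tm) iv = (l, iv.2) :: tm := by
                simp [pvMergeStep, h1, h2]
              rw [hstep]
              exact ih ((l, iv.2) :: tm) hp'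
                (by intro x hx l' h' t' he; cases he; exact hlx.trans (hle x hx))
                (List.pairwise_cons.mpr ⟨htm, hmr.tail⟩)
            · have hstep : pvMergeStep ((l, h) :: tm) iv = (l, h) :: tm := by
                simp [pvMergeStep, h1, h2]
              rw [hstep]
              exact ih ((l, h) :: tm) hp'
                (by intro x hx l' h' t' he; cases he; exact hlx.trans (hle x hx)) hmr
          · have hstep : pvMergeStep ((l, h) :: tm) iv = iv :: (l, h) :: tm := by
              simp [pvMergeStep, h1]
            rw [hstep]
            refine ih (iv :: (l, h) :: tm) hp'
              (by intro x hx l' h' t' he; cases he; exact hle x hx) ?_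
            refine List.pairwise_cons.mpr ⟨?_, hmr⟩
            intro y hy
            rcases List.mem_cons.mp hy with rfl | hy'
            · exact hlx
            · exact (htm y hy').trans hlx

-- early-exit scan equals full membership on a list sorted by lower bound
theorem pvCovered_eq_anyIv (merged : List (Int × Int)) (v : Int)
    (hs : merged.Pairwise (fun a b => a.1 ≤ b.1)) :
    pvCovered merged v = pvAnyIv merged v := by
  induction merged with
  | nil => rfl
  | cons p t ih =>
      obtain ⟨lo, hi⟩ := p
      have hle : ∀ x ∈ t, lo ≤ x.1 := by
        intro x hx; exact (List.pairwise_cons.mp hs).1 x hx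
      rw [pvAnyIv_cons]
      show (if v < lo then false else if v ≤ hi then true else pvCovered t v) = _
      by_cases h1 : v < lo
      · have ht : pvAnyIv t v = false := by
          rw [pvAnyIv, List.any_eq_false]
          intro x hx
          have := hle x hx
          simp only [Bool.and_eq_true, decide_eq_true_eq, not_and]
          omega
        simp [h1, ht]
      · by_cases h2 : v ≤ hi
        · simp [h1, h2]
          omega
        · rw [if_neg h1, if_neg h2, ih hs.tail]
          have : (decide (lo ≤ v) && decide (v ≤ hi)) = false := by
            simp; omega
          rw [this, Bool.false_or]

-- per-value agreement
theorem pvValue_agree (rules : List (String × List Int)) (v : Int) :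
    pvValidA rules v = pvCovered (pvMerged rules) v := by
  have hsorted : (PySem.List.sorted (pvIvs rules) (fun p => p.1) false).Pairwise
      (fun a b => a.1 ≤ b.1) := PySem.List.sorted_pairwise _ _
  have hany : pvAnyIv ((PySem.List.sorted (pvIvs rules) (fun p => p.1) false).foldl pvMergeStep []) v
      = pvAnyIv (PySem.List.sorted (pvIvs rules) (fun p => p.1) false) v := by
    rw [pvFoldMerge_any _ v [] hsorted (by intro x hx l h t he; cases he)]
    simp [pvAnyIv]
  have hrev : pvAnyIv (pvMerged rules) v
      = pvAnyIv ((PySem.List.sorted (pvIvs rules) (fun p => p.1) false).foldl pvMergeStep []) v := by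
    unfold pvMerged pvAnyIv
    rw [List.any_reverse]
  have hperm : (PySem.List.sorted (pvIvs rules) (fun p => p.1) false).Perm (pvIvs rules) :=
    PySem.List.sorted_perm _ _ _
  have hsortany : pvAnyIv (PySem.List.sorted (pvIvs rules) (fun p => p.1) false) v
      = pvAnyIv (pvIvs rules) v := by
    unfold pvAnyIv
    exact hperm.any_eq
  have hmergedpw : (pvMerged rules).Pairwise (fun a b => a.1 ≤ b.1) := by
    unfold pvMerged
    rw [List.pairwise_reverse]
    exact pvFoldMerge_pairwise _ [] hsorted (by intro x hx l h t he; cases he) (by simp)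
  rw [pvValidA_eq_anyIv, pvCovered_eq_anyIv _ _ hmergedpw, hrev, hany, hsortany]

-- ===== VERDICT (by name: the statement is the Claim_ definition above) =====
theorem invalid_count_spec : Claim_equal_invalid_count := by
  intro rules ticket _ _
  unfold Spec_invalid_count invalid_count invalid_count_alt
  induction ticket using List.reverseRecOn with
  | nil => rfl
  | append_singleton t v ih =>
      simp only [List.foldl_append, List.foldl_cons, List.foldl_nil, pvValue_agree, ih]
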